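-- pv_equiv track=rewrite | github.com/mohammadrezaamrollahi/karademy2 | 3.py | zero_one_digit_counter
-- ===== SOURCE A (Python) =====
-- def digit_adder(number):
--     if number < 10 :
--         return number
--     else:
--         string_number=str(number)
--         sum_up=0
--         for item in string_number:
--             sum_up += int(item)
--         return digit_adder(sum_up)
--
-- def zero_one_digit_counter(start , stop):
--     list1=[]
--     list2=[]
--     for number in range(start , stop):
--         if digit_adder(number)==1:
--             list1.append(number)
--         elif digit_adder(number)==2:
--             list2.append(number)
--     return len(list1) , len(list2)
-- ===== SOURCE B (Python) =====
-- def zero_one_digit_counter(start, stop):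
--     # closed-form: count n in [start,stop) with n >= 1 and n % 9 == r, r in {1,2}
--     lo = max(start, 1)
--     if stop <= lo:
--         return 0, 0
--     c1 = (stop - 2) // 9 - (lo - 2) // 9
--     c2 = (stop - 3) // 9 - (lo - 3) // 9
--     return c1, c2
-- ===== Notes on version B (the rewrite author's own statement) =====
-- stated objective: faster
-- what changed: B replaces the per-number recursive digit-root computation over [start,stop) by a closed-form count of integers n>=1 in the interval with n%9==1 resp. n%9==2 (two floor-division differences).
import Mathlib
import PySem

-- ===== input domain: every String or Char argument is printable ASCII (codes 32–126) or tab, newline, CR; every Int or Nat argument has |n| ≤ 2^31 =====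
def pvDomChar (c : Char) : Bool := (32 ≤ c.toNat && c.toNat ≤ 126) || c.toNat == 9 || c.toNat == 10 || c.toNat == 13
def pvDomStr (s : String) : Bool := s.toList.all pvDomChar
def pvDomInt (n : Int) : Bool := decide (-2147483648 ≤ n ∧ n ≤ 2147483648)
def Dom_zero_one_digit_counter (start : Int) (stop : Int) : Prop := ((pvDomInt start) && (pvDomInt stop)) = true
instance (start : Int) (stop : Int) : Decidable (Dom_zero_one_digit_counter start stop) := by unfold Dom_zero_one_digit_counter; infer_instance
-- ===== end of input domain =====

-- B computes the two counts in closed form (floor-division differences) instead of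
-- scanning the range and recursively summing digits: an O(1) re-implementation.


-- ===== PORT A =====
-- the lemmas below are needed by the port itself (termination of digit_adder)

-- `Nat.toDigitsCore` (the engine of `str(n)` = `PySem.Int.toChars`) produces the base-10 digits
theorem pv_toDigitsCore_digits : ∀ (f m : Nat) (l : List Char), 0 < m → m < f →
    Nat.toDigitsCore 10 f m l = ((Nat.digits 10 m).reverse.map Nat.digitChar) ++ l := by
  intro f
  induction f with
  | zero => intro m l hm hf; omega
  | succ f ih =>
    intro m l hm hf
    rw [Nat.toDigitsCore]
    by_cases h0 : m / 10 = 0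
    · rw [if_pos h0, Nat.digits_def' (by omega) hm, h0]
      simp
    · have hdiv : 0 < m / 10 := by omega
      have hfuel : m / 10 < f := by
        have hlt : m / 10 < m := Nat.div_lt_self hm (by omega)
        omega
      rw [if_neg h0, ih (m / 10) ((m % 10).digitChar :: l) hdiv hfuel]
      rw [Nat.digits_def' (by omega) hm]
      simp

theorem pv_digits_sum_le (m : Nat) : (Nat.digits 10 m).sum ≤ m := by
  induction m using Nat.strong_induction_on with
  | _ m ih =>
    rcases Nat.eq_zero_or_pos m with h | h
    · simp [h]
    · rw [Nat.digits_def' (by omega) h]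
      have h1 : (Nat.digits 10 (m / 10)).sum ≤ m / 10 :=
        ih (m / 10) (Nat.div_lt_self h (by omega))
      simp only [List.sum_cons]
      omega

theorem pv_digits_sum_lt (m : Nat) (h : 10 ≤ m) : (Nat.digits 10 m).sum < m := by
  rw [Nat.digits_def' (by omega) (by omega)]
  have h1 : (Nat.digits 10 (m / 10)).sum ≤ m / 10 := pv_digits_sum_le (m / 10)
  simp only [List.sum_cons]
  omega

-- int(item) on a single decimal digit character
theorem pv_ofChars_digitChar (d : Nat) (h : d < 10) :
    (PySem.Int.ofChars? [Nat.digitChar d]).getD 0 = (d : Int) := by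
  interval_cases d <;> decide

-- the digit-sum loop of digit_adder, for a positive argument, computes the base-10 digit sum
theorem pv_charsum_eq (m : Nat) (hm : 0 < m) :
    (PySem.Int.toChars (m : Int)).foldl
      (fun sum_up item => sum_up + (PySem.Int.ofChars? [item]).getD 0) 0
      = ((Nat.digits 10 m).sum : Int) := by
  have htc : PySem.Int.toChars (m : Int) = (Nat.digits 10 m).reverse.map Nat.digitChar := by
    rw [PySem.Int.toChars]
    rw [if_neg (by omega)]
    have : (m : Int).toNat = m := rfl
    rw [this, Nat.toDigits, pv_toDigitsCore_digits (m + 1) m [] hm (by omega)]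
    simp
  rw [htc, PySem.List.foldl_add, List.map_map]
  have key : ∀ l : List Nat, (∀ d ∈ l, d < 10) →
      (l.map ((fun item => (PySem.Int.ofChars? [item]).getD 0) ∘ Nat.digitChar)).sum
        = (l.sum : Int) := by
    intro l hl
    induction l with
    | nil => simp
    | cons d l ihl =>
      simp only [List.map_cons, List.sum_cons, Function.comp_apply]
      rw [pv_ofChars_digitChar d (hl d (by simp)),
          ihl (fun x hx => hl x (by simp [hx]))]
      push_cast
      ring
  rw [key _ (fun d hd => Nat.digits_lt_base (by omega) (List.mem_reverse.mp hd)),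
      List.sum_reverse]
  simp

def digit_adder (number : Int) : Int :=
  if number < 10 then number
  else
    let string_number := PySem.Int.toChars number
    let sum_up := string_number.foldl
      (fun sum_up item => sum_up + (PySem.Int.ofChars? [item]).getD 0) 0
    digit_adder sum_up
termination_by number.toNat
decreasing_by
  have hm : number = ((number.toNat : Nat) : Int) := by omega
  rw [hm, pv_charsum_eq number.toNat (by omega)]
  have := pv_digits_sum_lt number.toNat (by omega)
  omega

def zero_one_digit_counter (start : Int) (stop : Int) : List Int :=
  let p := (PySem.List.pyRange start stop 1).foldl
    (fun (st : List Int × List Int) number =>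
      if digit_adder number == 1 then (st.1 ++ [number], st.2)
      else if digit_adder number == 2 then (st.1, st.2 ++ [number])
      else st) ([], [])
  [PySem.List.len p.1, PySem.List.len p.2]

-- ===== PORT B =====
def zero_one_digit_counter_alt (start : Int) (stop : Int) : List Int :=
  let lo := max start 1
  if stop ≤ lo then [0, 0]
  else
    [PySem.Int.floordiv (stop - 2) 9 - PySem.Int.floordiv (lo - 2) 9,
     PySem.Int.floordiv (stop - 3) 9 - PySem.Int.floordiv (lo - 3) 9]

-- ===== PRECONDITION & SPEC =====
def Spec_zero_one_digit_counter (start : Int) (stop : Int) (out : List Int) : Prop := out = zero_one_digit_counter_alt start stop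
instance (start : Int) (stop : Int) (out : List Int) : Decidable (Spec_zero_one_digit_counter start stop out) := by unfold Spec_zero_one_digit_counter; infer_instance

-- ===== CLAIM (what is proved, stated in full; the proofs are below) =====
def Claim_equal_zero_one_digit_counter : Prop := ∀ (start : Int) (stop : Int), Dom_zero_one_digit_counter start stop → Spec_zero_one_digit_counter start stop (zero_one_digit_counter start stop)

-- ===== LEMMAS AND PROOFS =====

theorem pv_digits_sum_pos (m : Nat) (h : 0 < m) : 0 < (Nat.digits 10 m).sum := by
  induction m using Nat.strong_induction_on with
  | _ m ih =>
    rw [Nat.digits_def' (by omega) h]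
    simp only [List.sum_cons]
    by_cases h0 : m % 10 = 0
    · have := ih (m / 10) (Nat.div_lt_self h (by omega)) (by omega)
      omega
    · omega

-- the digital root of a positive integer
theorem pv_digit_adder_pos_aux : ∀ (k : Nat) (n : Int), n.toNat = k → 1 ≤ n →
    digit_adder n = (n - 1) % 9 + 1 := by
  intro k
  induction k using Nat.strong_induction_on with
  | _ k ih =>
    intro n hk hn
    rw [digit_adder]
    by_cases h : n < 10
    · rw [if_pos h]; omega
    · rw [if_neg h]
      have hm : n = ((n.toNat : Nat) : Int) := by omega
      rw [hm]
      simp only [pv_charsum_eq n.toNat (by omega)]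
      have hS : 0 < (Nat.digits 10 n.toNat).sum := pv_digits_sum_pos n.toNat (by omega)
      have hlt : (Nat.digits 10 n.toNat).sum < n.toNat := pv_digits_sum_lt n.toNat (by omega)
      rw [ih ((Nat.digits 10 n.toNat).sum) (by omega)
          (((Nat.digits 10 n.toNat).sum : Nat) : Int) (Int.toNat_natCast _) (by exact_mod_cast hS)]
      have hmod : n.toNat % 9 = (Nat.digits 10 n.toNat).sum % 9 := Nat.modEq_nine_digits_sum n.toNat
      have hmodZ : ((n.toNat : Int)) % 9 = (((Nat.digits 10 n.toNat).sum : Int)) % 9 := by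
        exact_mod_cast congrArg (Nat.cast (R := Int)) hmod
      omega

theorem pv_digit_adder_pos (n : Int) (hn : 1 ≤ n) : digit_adder n = (n - 1) % 9 + 1 :=
  pv_digit_adder_pos_aux n.toNat n rfl hn

-- digit_adder hits r ∈ {1,2} exactly on positive n ≡ r (mod 9)
theorem pv_digit_adder_eq_iff (n r : Int) (hr : r = 1 ∨ r = 2) :
    (digit_adder n = r) ↔ (1 ≤ n ∧ n % 9 = r) := by
  by_cases hn : 1 ≤ n
  · rw [pv_digit_adder_pos n hn]
    omega
  · rw [digit_adder]
    rw [if_pos (by omega)]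
    omega

-- the accumulator fold of A builds the two filtered lists
theorem pv_foldA (xs : List Int) (l1 l2 : List Int) :
    xs.foldl
      (fun (st : List Int × List Int) number =>
        if digit_adder number == 1 then (st.1 ++ [number], st.2)
        else if digit_adder number == 2 then (st.1, st.2 ++ [number])
        else st) (l1, l2)
      = (l1 ++ xs.filter (fun n => digit_adder n == 1),
         l2 ++ xs.filter (fun n => !(digit_adder n == 1) && (digit_adder n == 2))) := by
  induction xs generalizing l1 l2 with
  | nil => simp
  | cons x xs ih =>
    simp only [List.foldl_cons, List.filter_cons]
    by_cases h1 : digit_adder x == 1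
    · rw [if_pos h1, ih]
      simp [h1, List.append_assoc]
    · by_cases h2 : digit_adder x == 2
      · rw [if_neg h1, if_pos h2, ih]
        simp [h1, h2, List.append_assoc]
      · rw [if_neg h1, if_neg h2, ih]
        simp [h1, h2]

-- closed-form count of n in [start,stop) with digit_adder n = r, r ∈ {1,2}
theorem pv_count_eq (r : Int) (hr : r = 1 ∨ r = 2) (start : Int) : ∀ (stop : Int),
    (((PySem.List.pyRange start stop 1).countP (fun n => digit_adder n == r) : Nat) : Int)
      = (if stop ≤ max start 1 then 0
         else (stop - 1 - r) / 9 - (max start 1 - 1 - r) / 9) := by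
  intro stop
  by_cases hss : stop ≤ start
  · have hnil : PySem.List.pyRange start stop 1 = [] := by
      simp [PySem.List.pyRange]; omega
    rw [hnil, if_pos (by omega)]
    simp
  · have hk : stop = start + ((stop - start).toNat : Int) := by omega
    rw [hk]
    generalize (stop - start).toNat = k
    clear hk hss stop
    induction k with
    | zero =>
      simp only [Nat.cast_zero, add_zero]
      have hnil : PySem.List.pyRange start start 1 = [] := by
        simp [PySem.List.pyRange]
      rw [hnil, if_pos (by omega)]
      simp
    | succ k ih =>
      have hsplit : PySem.List.pyRange start (start + (k + 1 : Nat)) 1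
          = PySem.List.pyRange start (start + (k : Nat)) 1 ++ [start + (k : Nat)] := by
        have : (start + ((k + 1 : Nat) : Int)) = (start + (k : Nat)) + 1 := by push_cast; ring
        rw [this, PySem.List.pyRange_one_succ_right (by omega)]
      rw [hsplit, List.countP_append]
      push_cast
      rw [ih]
      have hone : ((List.countP (fun n => digit_adder n == r) [start + (k : Nat)] : Nat) : Int)
          = (if 1 ≤ start + (k : Nat) ∧ (start + (k : Nat)) % 9 = r then 1 else 0) := by
        simp only [List.countP_cons, List.countP_nil]
        by_cases hd : digit_adder (start + (k : Nat)) = r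
        · rw [if_pos ((pv_digit_adder_eq_iff _ r hr).mp hd)]
          simp [hd]
        · rw [if_neg (fun hc => hd ((pv_digit_adder_eq_iff _ r hr).mpr hc))]
          simp [hd]
      rw [hone]
      have h9 : (0 : Int) < 9 := by omega
      split_ifs <;> omega

-- ===== VERDICT (by name: the statement is the Claim_ definition above) =====
theorem zero_one_digit_counter_spec : Claim_equal_zero_one_digit_counter := by
  intro start stop _
  unfold Spec_zero_one_digit_counter zero_one_digit_counter zero_one_digit_counter_alt
  rw [pv_foldA]
  simp only [List.nil_append, PySem.List.len_eq, ← List.countP_eq_length_filter]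
  have hc2 : (PySem.List.pyRange start stop 1).countP
      (fun n => !(digit_adder n == 1) && (digit_adder n == 2))
      = (PySem.List.pyRange start stop 1).countP (fun n => digit_adder n == 2) := by
    apply List.countP_congr
    intro n _
    by_cases h : digit_adder n = 2
    · simp [h]
    · simp [h]
  rw [hc2]
  have e1 := pv_count_eq 1 (by omega) start stop
  have e2 := pv_count_eq 2 (by omega) start stop
  rw [PySem.Int.floordiv_eq_ediv_of_pos (by omega), PySem.Int.floordiv_eq_ediv_of_pos (by omega),
      PySem.Int.floordiv_eq_ediv_of_pos (by omega), PySem.Int.floordiv_eq_ediv_of_pos (by omega)] 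
  by_cases h : stop ≤ max start 1
  · rw [if_pos h]
    rw [if_pos h] at e1 e2
    simp only [e1, e2]
  · rw [if_neg h]
    rw [if_neg h] at e1 e2
    simp only [e1, e2,
      show stop - 1 - 1 = stop - 2 from by ring,
      show stop - 1 - 2 = stop - 3 from by ring,
      show max start 1 - 1 - 1 = max start 1 - 2 from by ring,
      show max start 1 - 1 - 2 = max start 1 - 3 from by ring]
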